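-- pv_equiv track=rewrite | github.com/wojiaonioo/gmcore_dashboard | dashboard/tabs/build_run.py | _build_case_options
-- ===== SOURCE A (Python) =====
-- def _build_case_options(
--     testbed_data: dict[str, list[dict[str, object]]]
-- ) -> list[dict[str, object]]:
--     options: list[dict[str, object]] = []
--
--     for category in sorted(testbed_data):
--         cases = sorted(
--             testbed_data[category],
--             key=lambda case: str(case.get("name", "")),
--         )
--         for case in cases:
--             case_name = str(case.get("name", ""))
--             options.append({"label": case_name, "value": case_name})
--
--     return options
-- ===== SOURCE B (Python) =====
-- def _build_case_options(
--     testbed_data: dict[str, list[dict[str, object]]]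
-- ) -> list[dict[str, object]]:
--     pairs = [
--         (category, str(case.get("name", "")))
--         for category, cases in testbed_data.items()
--         for case in cases
--     ]
--     pairs.sort(key=lambda t: (t[0], t[1]))
--     return [{"label": name, "value": name} for _, name in pairs]
-- ===== Notes on version B (the rewrite author's own statement) =====
-- stated objective: alternative
-- what changed: Replaces the nested sort (sort categories, then sort each category's cases and append in a loop) by flattening everything into (category, name) pairs once, doing a single global sort on the (category, name) tuple, and emitting the options in one flat map.
import Mathlib
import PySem

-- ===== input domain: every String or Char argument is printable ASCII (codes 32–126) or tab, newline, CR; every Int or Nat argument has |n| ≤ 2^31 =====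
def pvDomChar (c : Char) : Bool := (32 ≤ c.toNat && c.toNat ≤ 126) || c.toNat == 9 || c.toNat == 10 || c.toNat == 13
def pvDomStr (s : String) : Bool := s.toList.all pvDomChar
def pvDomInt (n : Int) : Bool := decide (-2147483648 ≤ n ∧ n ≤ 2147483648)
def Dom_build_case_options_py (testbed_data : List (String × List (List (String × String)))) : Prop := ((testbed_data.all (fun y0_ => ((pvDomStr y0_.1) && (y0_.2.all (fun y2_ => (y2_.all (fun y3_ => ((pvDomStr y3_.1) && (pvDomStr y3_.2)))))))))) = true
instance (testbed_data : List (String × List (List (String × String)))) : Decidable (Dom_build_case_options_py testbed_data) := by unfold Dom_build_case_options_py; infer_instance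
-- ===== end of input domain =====

-- B replaces A's nested sorts (sorted categories, then per-category sorted cases) by one
-- flatten into (category, name) pairs + one global sort on the pair + one flat emit ("alternative").

-- str(case.get("name", "")) — shared one-line primitive wrapper, used by both ports
def nameOf (case : List (String × String)) : String :=
  (PySem.Dict.ofList case).getD "name" ""

-- ===== PORT A =====
def build_case_options_py (testbed_data : List (String × List (List (String × String)))) : List (List (String × String)) :=
  let d := PySem.Dict.ofList testbed_data
  let options : List (List (String × String)) := []
  (PySem.List.sorted d.keys (fun k => k)).foldl
    (fun options category =>
      let cases := PySem.List.sorted (d.getD category []) (fun case => nameOf case)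
      cases.foldl
        (fun options case =>
          let case_name := nameOf case
          options ++ [[("label", case_name), ("value", case_name)]])
        options)
    options

-- ===== PORT B =====
def build_case_options_py_alt (testbed_data : List (String × List (List (String × String)))) : List (List (String × String)) :=
  let d := PySem.Dict.ofList testbed_data
  let pairs := d.items.flatMap (fun kv => kv.2.map (fun case => (kv.1, nameOf case)))
  (PySem.List.sorted2 pairs Prod.fst Prod.snd).map (fun t => [("label", t.2), ("value", t.2)])

-- ===== PRECONDITION & SPEC =====
def Spec_build_case_options_py (testbed_data : List (String × List (List (String × String)))) (out : List (List (String × String))) : Prop := out = build_case_options_py_alt testbed_data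
instance (testbed_data : List (String × List (List (String × String)))) (out : List (List (String × String))) : Decidable (Spec_build_case_options_py testbed_data out) := by unfold Spec_build_case_options_py; infer_instance

-- ===== CLAIM (what is proved, stated in full; the proofs are below) =====
def Claim_equal_build_case_options_py : Prop := ∀ (testbed_data : List (String × List (List (String × String)))), Dom_build_case_options_py testbed_data → Spec_build_case_options_py testbed_data (build_case_options_py testbed_data)

-- ===== LEMMAS AND PROOFS =====

-- the comparison sorted2 uses for key = (Prod.fst, Prod.snd)
def lexBefore (a b : String × String) : Bool :=
  decide (a.1 < b.1) || (!decide (b.1 < a.1) && decide (a.2 < b.2))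

lemma lex_le_of_snd {k x y : String} (h : x ≤ y) : toLex (k, x) ≤ toLex (k, y) :=
  Prod.Lex.le_iff.2 (Or.inr ⟨rfl, h⟩)

lemma lex_le_of_fst {k₁ k₂ x y : String} (h : k₁ < k₂) : toLex (k₁, x) ≤ toLex (k₂, y) :=
  Prod.Lex.le_iff.2 (Or.inl h)

lemma lexBefore_true {a b : String × String} (h : lexBefore a b = true) :
    toLex a ≤ toLex b := by
  unfold lexBefore at h
  rw [Prod.Lex.le_iff]
  simp only [Bool.or_eq_true, Bool.and_eq_true, Bool.not_eq_true', decide_eq_true_eq,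
    decide_eq_false_iff_not] at h
  rcases h with h | ⟨h1, h2⟩
  · exact Or.inl h
  · rcases lt_trichotomy a.1 b.1 with hlt | heq | hgt
    · exact Or.inl hlt
    · exact Or.inr ⟨heq, le_of_lt h2⟩
    · exact absurd hgt h1
lemma lexBefore_false {a b : String × String} (h : lexBefore a b = false) :
    toLex b ≤ toLex a := by
  unfold lexBefore at h
  rw [Prod.Lex.le_iff]
  simp only [Bool.or_eq_false_iff, Bool.and_eq_false_iff, Bool.not_eq_false',
    decide_eq_true_eq, decide_eq_false_iff_not] at h
  rcases h.2 with h2 | h2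
  · exact Or.inl h2
  · rcases lt_trichotomy b.1 a.1 with hlt | heq | hgt
    · exact Or.inl hlt
    · exact Or.inr ⟨heq, not_lt.1 h2⟩
    · exact absurd hgt h.1

lemma pairwise_insertBy_lex (x : String × String) (l : List (String × String))
    (h : l.Pairwise (fun a b => toLex a ≤ toLex b)) :
    (PySem.List.insertBy lexBefore x l).Pairwise (fun a b => toLex a ≤ toLex b) := by
  induction l with
  | nil => simp [PySem.List.insertBy]
  | cons y ys ih =>
    rw [List.pairwise_cons] at h
    rw [PySem.List.insertBy]
    split
    · rename_i hb
      refine List.Pairwise.cons ?_ (List.Pairwise.cons h.1 h.2)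
      intro z hz
      rcases List.mem_cons.1 hz with rfl | hz
      · exact lexBefore_true hb
      · exact le_trans (lexBefore_true hb) (h.1 z hz)
    · rename_i hb
      refine List.Pairwise.cons ?_ (ih h.2)
      intro z hz
      rcases (PySem.List.mem_insertBy _ _ _ _).1 hz with rfl | hz
      · exact lexBefore_false (Bool.of_not_eq_true hb)
      · exact h.1 z hz

lemma pairwise_foldl_insertBy_lex (xs : List (String × String)) :
    ∀ acc, acc.Pairwise (fun a b => toLex a ≤ toLex b) →
      (xs.foldl (fun acc x => PySem.List.insertBy lexBefore x acc) acc).Pairwise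
        (fun a b => toLex a ≤ toLex b) := by
  induction xs with
  | nil => intro acc h; simpa using h
  | cons x xs ih => intro acc h; exact ih _ (pairwise_insertBy_lex x acc h)

lemma sorted2_pairwise_lex (xs : List (String × String)) :
    (PySem.List.sorted2 xs Prod.fst Prod.snd).Pairwise (fun a b => toLex a ≤ toLex b) := by
  have hdef : PySem.List.sorted2 xs Prod.fst Prod.snd
      = xs.foldl (fun acc x => PySem.List.insertBy lexBefore x acc) [] := rfl
  rw [hdef]
  exact pairwise_foldl_insertBy_lex xs [] List.Pairwise.nil

-- the heart of the equivalence, stated over any dict with (always true) unique keys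
lemma nested_eq_global (d : PySem.Dict String (List (List (String × String))))
    (hnd : d.keys.Nodup) :
    (PySem.List.sorted d.keys (fun k => k)).foldl
      (fun options category =>
        (PySem.List.sorted (d.getD category []) (fun case => nameOf case)).foldl
          (fun options case => options ++ [[("label", nameOf case), ("value", nameOf case)]])
          options)
      ([] : List (List (String × String)))
    = (PySem.List.sorted2 (d.items.flatMap (fun kv => kv.2.map (fun case => (kv.1, nameOf case))))
        Prod.fst Prod.snd).map (fun t => [("label", t.2), ("value", t.2)]) := by
  have hA : (PySem.List.sorted d.keys (fun k => k)).foldl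
      (fun options category =>
        (PySem.List.sorted (d.getD category []) (fun case => nameOf case)).foldl
          (fun options case => options ++ [[("label", nameOf case), ("value", nameOf case)]])
          options)
      ([] : List (List (String × String)))
      = (PySem.List.sorted d.keys (fun k => k)).flatMap
          (fun k => (PySem.List.sorted (d.getD k []) (fun case => nameOf case)).map
            (fun c => [("label", nameOf c), ("value", nameOf c)])) := by
    simp only [PySem.List.foldl_append_singleton_eq_map, PySem.List.foldl_append_eq_flatMap,
      List.nil_append]
  rw [hA]
  set pairs : List (String × String) :=
      d.items.flatMap (fun kv => kv.2.map (fun case => (kv.1, nameOf case))) with hp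
  set T : List (String × String) := (PySem.List.sorted d.keys (fun k => k)).flatMap
      (fun k => (PySem.List.sorted (d.getD k []) (fun case => nameOf case)).map
        (fun c => (k, nameOf c))) with hT
  have hpairs : pairs = d.keys.flatMap (fun k => (d.getD k []).map (fun c => (k, nameOf c))) := by
    rw [hp, PySem.Dict.items_eq_map_keys d hnd ([] : List (List (String × String))),
      List.flatMap_map]
  have hperm : T.Perm pairs := by
    rw [hT, hpairs]
    refine List.Perm.trans ?_ (List.Perm.flatMap_right _ (PySem.List.sorted_perm d.keys (fun k => k) false))
    exact List.Perm.flatMap_left _ (fun k _ => List.Perm.map _ (PySem.List.sorted_perm _ _ false))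
  have hTpw : T.Pairwise (fun a b => toLex a ≤ toLex b) := by
    rw [hT, List.flatMap, List.pairwise_flatten]
    constructor
    · intro l hl
      rcases List.mem_map.1 hl with ⟨k, _, rfl⟩
      rw [List.pairwise_map]
      exact (PySem.List.sorted_pairwise (d.getD k []) (fun case => nameOf case)).imp
        (fun hab => lex_le_of_snd hab)
    · rw [List.pairwise_map]
      have hle : (PySem.List.sorted d.keys (fun k => k)).Pairwise (fun a b => a ≤ b) :=
        PySem.List.sorted_pairwise d.keys (fun k => k)
      have hnd' : (PySem.List.sorted d.keys (fun k => k)).Nodup :=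
        ((PySem.List.sorted_perm d.keys (fun k => k) false).nodup_iff).2 hnd
      have hlt : (PySem.List.sorted d.keys (fun k => k)).Pairwise (fun a b => a < b) :=
        (hle.and hnd').imp (fun hab => lt_of_le_of_ne hab.1 hab.2)
      refine hlt.imp ?_
      intro k₁ k₂ hk x hx y hy
      rcases List.mem_map.1 hx with ⟨c₁, _, rfl⟩
      rcases List.mem_map.1 hy with ⟨c₂, _, rfl⟩
      exact lex_le_of_fst hk
  have hsort : PySem.List.sorted2 pairs Prod.fst Prod.snd = T :=
    PySem.List.eq_of_perm_of_pairwise_le_of_injective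
      (fun p : String × String => toLex p) toLex.injective
      (List.Perm.trans (PySem.List.sorted2_perm pairs Prod.fst Prod.snd false) hperm.symm)
      (sorted2_pairwise_lex pairs) hTpw
  rw [hsort, hT, List.map_flatMap]
  simp [Function.comp_def]

-- ===== VERDICT (by name: the statement is the Claim_ definition above) =====
theorem build_case_options_py_spec : Claim_equal_build_case_options_py := by
  intro td _
  unfold Spec_build_case_options_py build_case_options_py build_case_options_py_alt
  exact nested_eq_global (PySem.Dict.ofList td) (PySem.Dict.nodup_keys_ofList td)
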